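-- pv_equiv track=rewrite | github.com/CAMeL-Lab/samer-arabic-readability | models/MLE/mle.py | get_mle_counts_aligned
-- ===== SOURCE A (Python) =====
-- def get_mle_counts_aligned(words, levels):
--   dict_levels = {}
--   for word, level in zip(words, levels):
--       try:
--           #assume every entry of dict_levels : {3: int, 4: int, 5: int}
--           dict_levels[word][level] += 1
--       except:
--           dict_levels[word] = {3: 0, 4: 0, 5: 0}
--           dict_levels[word][level] += 1
--   return dict_levels
-- ===== SOURCE B (Python) =====
-- def get_mle_counts_aligned(words, levels):
--     # Pass 1: tally each (word, level) pair once.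
--     pair_counts = {}
--     for p in zip(words, levels):
--         pair_counts[p] = pair_counts.get(p, 0) + 1
--     # Pass 2: reshape the tallied pairs into per-word {3,4,5} tables.
--     result = {}
--     for (word, level), n in pair_counts.items():
--         inner = result.setdefault(word, {3: 0, 4: 0, 5: 0})
--         inner[level] += n
--     return result
-- ===== Notes on version B (the rewrite author's own statement) =====
-- stated objective: alternative
-- what changed: A folds each (word,level) occurrence into the nested dict via try/except; B makes one flat pass tallying pair->count and a second differently-shaped pass reshaping the tallied pairs into per-word {3,4,5} tables via setdefault.
import Mathlib
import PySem

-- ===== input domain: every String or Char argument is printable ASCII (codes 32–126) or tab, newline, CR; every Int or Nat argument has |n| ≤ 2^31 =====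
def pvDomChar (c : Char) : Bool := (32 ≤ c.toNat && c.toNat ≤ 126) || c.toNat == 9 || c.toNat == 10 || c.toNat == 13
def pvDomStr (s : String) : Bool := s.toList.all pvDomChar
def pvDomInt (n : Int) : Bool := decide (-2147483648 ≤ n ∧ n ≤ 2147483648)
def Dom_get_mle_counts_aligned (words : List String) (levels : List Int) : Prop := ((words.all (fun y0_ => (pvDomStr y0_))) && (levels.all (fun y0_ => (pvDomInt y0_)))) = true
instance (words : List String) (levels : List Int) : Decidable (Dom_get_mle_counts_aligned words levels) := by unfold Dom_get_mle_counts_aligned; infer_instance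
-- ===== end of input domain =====

-- B replaces A's single try/except fold with two passes: tally pair counts, then reshape; same cost (objective: alternative).
-- Both ports raise nowhere; inputs where the Pythons raise KeyError (a paired level outside {3,4,5}) are excluded by Pre_.

-- ===== PORT A =====
-- the literal {3: 0, 4: 0, 5: 0} both Pythons write
def pvFresh : PySem.Dict Int Int := PySem.Dict.ofList [(3, 0), (4, 0), (5, 0)]

-- one iteration of A's loop: try dict_levels[word][level] += 1 / except: fresh then += 1
def pvStepA (d : PySem.Dict String (PySem.Dict Int Int)) (p : String × Int) :
    PySem.Dict String (PySem.Dict Int Int) :=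
  match (d.get? p.1).bind (fun inner => inner.get? p.2) with
  | some c => d.insert p.1 ((d.getD p.1 PySem.Dict.empty).insert p.2 (c + 1))
  | none =>
    match pvFresh.get? p.2 with
    | some c => d.insert p.1 (pvFresh.insert p.2 (c + 1))
    | none => d.insert p.1 pvFresh   -- Python raises KeyError here (level not in {3,4,5}); outside Pre_

def get_mle_counts_aligned (words : List String) (levels : List Int) : List (String × List (Int × Int)) :=
  (((words.zip levels).foldl pvStepA PySem.Dict.empty).items).map (fun e => (e.1, e.2.items))

-- ===== PORT B =====
-- the literal {3: 0, 4: 0, 5: 0} as written in Source B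
def pvFreshB : PySem.Dict Int Int := PySem.Dict.ofList [(3, 0), (4, 0), (5, 0)]

-- one iteration of B's second pass: inner = result.setdefault(word, fresh); inner[level] += n
def pvStepB (r : PySem.Dict String (PySem.Dict Int Int)) (e : (String × Int) × Int) :
    PySem.Dict String (PySem.Dict Int Int) :=
  let r' := r.setdefault e.1.1 pvFreshB
  r'.insert e.1.1 ((r'.getD e.1.1 PySem.Dict.empty).modify e.1.2 0 (· + e.2))

def get_mle_counts_aligned_alt (words : List String) (levels : List Int) : List (String × List (Int × Int)) :=
  let pairCounts := (words.zip levels).foldl (fun d p => d.insert p (d.getD p 0 + 1)) PySem.Dict.empty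
  ((pairCounts.items.foldl pvStepB PySem.Dict.empty).items).map (fun e => (e.1, e.2.items))

-- ===== PRECONDITION & SPEC =====
-- Pre_ excludes exactly the inputs where A raises KeyError: a level paired with a word that is not 3, 4 or 5.
def Pre_get_mle_counts_aligned (words : List String) (levels : List Int) : Prop :=
  ∀ p ∈ words.zip levels, p.2 = 3 ∨ p.2 = 4 ∨ p.2 = 5
instance (words : List String) (levels : List Int) : Decidable (Pre_get_mle_counts_aligned words levels) := by unfold Pre_get_mle_counts_aligned; infer_instance
def pvWitness_get_mle_counts_aligned : List String × List Int := (["to", "be", "to"], [3, 5, 3])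

-- ===== PRECONDITION & SPEC =====
def Spec_get_mle_counts_aligned (words : List String) (levels : List Int) (out : List (String × List (Int × Int))) : Prop := out = get_mle_counts_aligned_alt words levels
instance (words : List String) (levels : List Int) (out : List (String × List (Int × Int))) : Decidable (Spec_get_mle_counts_aligned words levels out) := by unfold Spec_get_mle_counts_aligned; infer_instance

-- ===== CLAIM (what is proved, stated in full; the proofs are below) =====
def Claim_equal_get_mle_counts_aligned : Prop := ∀ (words : List String) (levels : List Int), Dom_get_mle_counts_aligned words levels → Pre_get_mle_counts_aligned words levels → Spec_get_mle_counts_aligned words levels (get_mle_counts_aligned words levels)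

-- ===== LEMMAS AND PROOFS =====
def pvRow (ps : List (String × Int)) (w : String) : List (Int × Int) :=
  [(3, (ps.count (w, 3) : Int)), (4, (ps.count (w, 4) : Int)), (5, (ps.count (w, 5) : Int))]

def pvTab (ps : List (String × Int)) : List (String × PySem.Dict Int Int) :=
  (PySem.Set.ofList (ps.map Prod.fst)).map (fun w => (w, PySem.Dict.mk (pvRow ps w)))

lemma pvRow_append_same (ps : List (String × Int)) (w : String) (l : Int)
    (hl : l = 3 ∨ l = 4 ∨ l = 5) :
    PySem.Dict.mk (pvRow (ps ++ [(w, l)]) w)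
      = (PySem.Dict.mk (pvRow ps w)).insert l ((ps.count (w, l) : Int) + 1) := by
  rcases hl with h | h | h <;> subst h <;>
    simp [pvRow, List.count_append, PySem.Dict.insert, Prod.ext_iff]

lemma pvRow_append_ne (ps : List (String × Int)) (w w' : String) (l : Int) (hw : w' ≠ w) :
    pvRow (ps ++ [(w, l)]) w' = pvRow ps w' := by
  simp only [pvRow, List.count_append]
  have : ∀ l' : Int, List.count ((w', l') : String × Int) [(w, l)] = 0 := by
    intro l'
    rw [List.count_eq_zero]
    simp [Prod.ext_iff]
    intro h
    exact absurd h.symm (Ne.symm hw)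
  simp [this]

lemma pvRow_of_not_mem (ps : List (String × Int)) (w : String) (hw : w ∉ ps.map Prod.fst) :
    pvRow ps w = [(3, 0), (4, 0), (5, 0)] := by
  have h : ∀ l : Int, ps.count (w, l) = 0 := by
    intro l
    rw [List.count_eq_zero]
    intro hmem
    exact hw (List.mem_map.2 ⟨(w, l), hmem, rfl⟩)
  simp [pvRow, h]

lemma pvTab_keys (ps : List (String × Int)) :
    (pvTab ps).map Prod.fst = PySem.Set.ofList (ps.map Prod.fst) := by
  rw [pvTab, List.map_map]
  have h : (Prod.fst ∘ fun w => (w, PySem.Dict.mk (pvRow ps w))) = id := rfl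
  rw [h, List.map_id]

lemma pvGet_row (ps : List (String × Int)) (w : String) (l : Int) (hl : l = 3 ∨ l = 4 ∨ l = 5) :
    (PySem.Dict.mk (pvRow ps w)).get? l = some ((ps.count (w, l) : Int)) := by
  rcases hl with h | h | h <;> subst h <;> simp [pvRow, PySem.Dict.get?_mk_cons]

lemma foldA_items (ps : List (String × Int)) (h : ∀ p ∈ ps, p.2 = 3 ∨ p.2 = 4 ∨ p.2 = 5) :
    (ps.foldl pvStepA PySem.Dict.empty).items = pvTab ps := by
  induction ps using List.reverseRecOn with
  | nil => decide
  | append_singleton ps p ih =>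
    have hps : ∀ q ∈ ps, q.2 = 3 ∨ q.2 = 4 ∨ q.2 = 5 := fun q hq => h q (by simp [hq])
    obtain ⟨w, l⟩ := p
    have hl : l = 3 ∨ l = 4 ∨ l = 5 := h (w, l) (by simp)
    have ih' := ih hps
    rw [List.foldl_append, List.foldl_cons, List.foldl_nil]
    set D := ps.foldl pvStepA PySem.Dict.empty with hD
    have hkeys : D.keys = PySem.Set.ofList (ps.map Prod.fst) := by
      show D.items.map Prod.fst = _
      rw [ih', pvTab_keys]
    have hnd : D.keys.Nodup := by rw [hkeys]; exact PySem.Set.nodup_ofList _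
    by_cases hw : w ∈ ps.map Prod.fst
    · -- word already present
      have hwS : w ∈ PySem.Set.ofList (ps.map Prod.fst) := by
        rw [PySem.Set.mem_ofList]; exact hw
      have hmem : (w, PySem.Dict.mk (pvRow ps w)) ∈ D.items := by
        rw [ih']; exact List.mem_map.2 ⟨w, hwS, rfl⟩
      have hg : D.get? w = some (PySem.Dict.mk (pvRow ps w)) :=
        PySem.Dict.get?_of_mem_items _ hmem hnd
      have hgd : D.getD w PySem.Dict.empty = PySem.Dict.mk (pvRow ps w) :=
        PySem.Dict.getD_of_get?_eq_some _ _ hg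
      have hcont : D.contains w = true := by
        rw [PySem.Dict.contains_iff_mem_keys, hkeys]; exact hwS
      have hstep : pvStepA D (w, l)
          = D.insert w ((PySem.Dict.mk (pvRow ps w)).insert l ((ps.count (w, l) : Int) + 1)) := by
        simp [pvStepA, hg, pvGet_row ps w l hl, hgd]
      rw [hstep, PySem.Dict.items_insert_of_contains _ _ hcont, ih']
      rw [← pvRow_append_same ps w l hl]
      simp only [pvTab, List.map_map]
      have hset : PySem.Set.ofList ((ps ++ [(w, l)]).map Prod.fst)
          = PySem.Set.ofList (ps.map Prod.fst) := by
        simp only [List.map_append]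
        rw [PySem.Set.ofList_eq_foldl, List.foldl_append, ← PySem.Set.ofList_eq_foldl]
        simp [PySem.Set.add, PySem.Set.contains, hwS]
      rw [hset]
      apply List.map_congr_left
      intro w' hw'
      by_cases he : w' = w
      · subst he; simp
      · simp only [Function.comp]
        have : ((w', PySem.Dict.mk (pvRow ps w')).1 == w) = false := by
          simp [he]
        simp only [this]
        rw [pvRow_append_ne ps w w' l he]
        simp
    · -- new word
      have hwS : w ∉ PySem.Set.ofList (ps.map Prod.fst) := by
        rw [PySem.Set.mem_ofList]; exact hw
      have hg : D.get? w = none := by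
        rw [PySem.Dict.get?_eq_none_iff_not_mem_keys, hkeys]; exact hwS
      have hcont : D.contains w = false := by
        rw [Bool.eq_false_iff, Ne, PySem.Dict.contains_iff_mem_keys, hkeys]
        exact hwS
      have hfresh : pvFresh.get? l = some 0 := by
        rcases hl with h' | h' | h' <;> subst h' <;> decide
      have hstep : pvStepA D (w, l) = D.insert w (pvFresh.insert l (0 + 1)) := by
        simp [pvStepA, hg, hfresh]
      rw [hstep, PySem.Dict.items_insert_of_not_contains _ _ hcont, ih']
      have hset : PySem.Set.ofList ((ps ++ [(w, l)]).map Prod.fst)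
          = PySem.Set.ofList (ps.map Prod.fst) ++ [w] := by
        simp only [List.map_append]
        rw [PySem.Set.ofList_eq_foldl, List.foldl_append, ← PySem.Set.ofList_eq_foldl]
        simp [PySem.Set.add, PySem.Set.contains, hwS]
      simp only [pvTab, List.map_append, List.map_cons, List.map_nil]
      rw [show (List.map Prod.fst ps ++ [w]) = List.map Prod.fst (ps ++ [(w, l)]) by simp,
        hset, List.map_append]
      congr 1
      · apply List.map_congr_left
        intro w' hw'
        have hne : w' ≠ w := by
          rintro rfl
          exact hwS hw'
        rw [pvRow_append_ne ps w w' l hne]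
      · have : PySem.Dict.mk (pvRow (ps ++ [(w, l)]) w)
            = (PySem.Dict.mk (pvRow ps w)).insert l ((ps.count (w, l) : Int) + 1) :=
          pvRow_append_same ps w l hl
        rw [pvRow_of_not_mem ps w hw] at this
        have hc0 : ps.count ((w, l) : String × Int) = 0 := by
          rw [List.count_eq_zero]
          intro hmem
          exact hw (List.mem_map.2 ⟨(w, l), hmem, rfl⟩)
        rw [hc0] at this
        simp only [List.map_cons, List.map_nil]
        rw [this]
        norm_num
        rfl

def pvWGet (q : List ((String × Int) × Int)) (w : String) (l : Int) : Int :=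
  ((q.filter (fun e => e.1 == (w, l))).map (·.2)).sum

def pvWRow (q : List ((String × Int) × Int)) (w : String) : List (Int × Int) :=
  [(3, pvWGet q w 3), (4, pvWGet q w 4), (5, pvWGet q w 5)]

def pvWTab (q : List ((String × Int) × Int)) : List (String × PySem.Dict Int Int) :=
  (PySem.Set.ofList (q.map (fun e => e.1.1))).map (fun w => (w, PySem.Dict.mk (pvWRow q w)))

lemma pvWGet_append (q : List ((String × Int) × Int)) (e : (String × Int) × Int)
    (w : String) (l : Int) :
    pvWGet (q ++ [e]) w l = pvWGet q w l + (if e.1 = (w, l) then e.2 else 0) := by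
  simp only [pvWGet, List.filter_append, List.map_append, List.sum_append]
  by_cases h : e.1 = (w, l) <;> simp [h]

lemma pvWRow_append_same (q : List ((String × Int) × Int)) (w : String) (l c : Int)
    (hl : l = 3 ∨ l = 4 ∨ l = 5) :
    PySem.Dict.mk (pvWRow (q ++ [((w, l), c)]) w)
      = (PySem.Dict.mk (pvWRow q w)).modify l 0 (· + c) := by
  rcases hl with h | h | h <;> subst h <;>
    simp [pvWRow, pvWGet_append, Prod.ext_iff, PySem.Dict.modify, PySem.Dict.insert,
      PySem.Dict.get?_mk_cons, PySem.Dict.getD]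

lemma pvWRow_append_ne (q : List ((String × Int) × Int)) (w w' : String) (l c : Int)
    (hw : w' ≠ w) :
    pvWRow (q ++ [((w, l), c)]) w' = pvWRow q w' := by
  have h : ∀ l' : Int, ¬ (((w, l), c) : (String × Int) × Int).1 = (w', l') := by
    intro l' h'
    exact hw (congrArg Prod.fst h').symm
  simp [pvWRow, pvWGet_append, h]

lemma pvWRow_of_not_mem (q : List ((String × Int) × Int)) (w : String)
    (hw : w ∉ q.map (fun e => e.1.1)) :
    pvWRow q w = [(3, 0), (4, 0), (5, 0)] := by
  have h : ∀ l : Int, pvWGet q w l = 0 := by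
    intro l
    have : q.filter (fun e => e.1 == (w, l)) = [] := by
      rw [List.filter_eq_nil_iff]
      intro e he hbeq
      have : e.1 = (w, l) := by simpa using hbeq
      exact hw (List.mem_map.2 ⟨e, he, congrArg Prod.fst this⟩)
    simp [pvWGet, this]
  simp [pvWRow, h]

lemma pvWTab_keys (q : List ((String × Int) × Int)) :
    (pvWTab q).map Prod.fst = PySem.Set.ofList (q.map (fun e => e.1.1)) := by
  rw [pvWTab, List.map_map]
  have h : (Prod.fst ∘ fun w => (w, PySem.Dict.mk (pvWRow q w))) = id := rfl
  rw [h, List.map_id]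

lemma foldB_items (q : List ((String × Int) × Int))
    (h : ∀ e ∈ q, e.1.2 = 3 ∨ e.1.2 = 4 ∨ e.1.2 = 5) :
    (q.foldl pvStepB PySem.Dict.empty).items = pvWTab q := by
  induction q using List.reverseRecOn with
  | nil => decide
  | append_singleton q e ih =>
    have hqs : ∀ e' ∈ q, e'.1.2 = 3 ∨ e'.1.2 = 4 ∨ e'.1.2 = 5 := fun e' he' => h e' (by simp [he'])
    obtain ⟨⟨w, l⟩, c⟩ := e
    have hl : l = 3 ∨ l = 4 ∨ l = 5 := h ((w, l), c) (by simp)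
    have ih' := ih hqs
    rw [List.foldl_append, List.foldl_cons, List.foldl_nil]
    set R := q.foldl pvStepB PySem.Dict.empty with hR
    have hkeys : R.keys = PySem.Set.ofList (q.map (fun e => e.1.1)) := by
      show R.items.map Prod.fst = _
      rw [ih', pvWTab_keys]
    have hnd : R.keys.Nodup := by rw [hkeys]; exact PySem.Set.nodup_ofList _
    by_cases hw : w ∈ q.map (fun e => e.1.1)
    · have hwS : w ∈ PySem.Set.ofList (q.map (fun e => e.1.1)) := by
        rw [PySem.Set.mem_ofList]; exact hw
      have hmem : (w, PySem.Dict.mk (pvWRow q w)) ∈ R.items := by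
        rw [ih']; exact List.mem_map.2 ⟨w, hwS, rfl⟩
      have hg : R.get? w = some (PySem.Dict.mk (pvWRow q w)) :=
        PySem.Dict.get?_of_mem_items _ hmem hnd
      have hcont : R.contains w = true := by
        rw [PySem.Dict.contains_iff_mem_keys, hkeys]; exact hwS
      have hstep : pvStepB R ((w, l), c)
          = R.insert w ((PySem.Dict.mk (pvWRow q w)).modify l 0 (· + c)) := by
        simp only [pvStepB]
        rw [PySem.Dict.setdefault_of_contains _ _ hcont, PySem.Dict.getD_of_get?_eq_some _ _ hg]
      rw [hstep, PySem.Dict.items_insert_of_contains _ _ hcont, ih']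
      rw [← pvWRow_append_same q w l c hl]
      simp only [pvWTab, List.map_map, List.map_append, List.map_cons, List.map_nil]
      have hset : PySem.Set.ofList (q.map (fun e => e.1.1) ++ [w])
          = PySem.Set.ofList (q.map (fun e => e.1.1)) := by
        rw [PySem.Set.ofList_eq_foldl, List.foldl_append, ← PySem.Set.ofList_eq_foldl]
        simp [PySem.Set.add, PySem.Set.contains, hwS]
      rw [hset]
      apply List.map_congr_left
      intro w' hw'
      by_cases he : w' = w
      · subst he; simp
      · simp only [Function.comp]
        have hb : ((w', PySem.Dict.mk (pvWRow q w')).1 == w) = false := by simp [he]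
        simp only [hb]
        rw [pvWRow_append_ne q w w' l c he]
        simp
    · have hwS : w ∉ PySem.Set.ofList (q.map (fun e => e.1.1)) := by
        rw [PySem.Set.mem_ofList]; exact hw
      have hcont : R.contains w = false := by
        rw [Bool.eq_false_iff, Ne, PySem.Dict.contains_iff_mem_keys, hkeys]
        exact hwS
      have hcont' : (R.insert w pvFreshB).contains w = true :=
        PySem.Dict.contains_insert_self _ _ _
      have hstep : pvStepB R ((w, l), c)
          = R.insert w (pvFreshB.modify l 0 (· + c)) := by
        simp only [pvStepB]
        rw [PySem.Dict.setdefault_of_not_contains _ _ hcont,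
PySem.Dict.getD_of_get?_eq_some _ _ (PySem.Dict.get?_insert_self _ _ _),
          PySem.Dict.insert_insert_self]
      have hcontIns : R.contains w = false := hcont
      rw [hstep, PySem.Dict.items_insert_of_not_contains _ _ hcont, ih']
      simp only [pvWTab, List.map_append, List.map_cons, List.map_nil]
      have hset : PySem.Set.ofList (q.map (fun e => e.1.1) ++ [w])
          = PySem.Set.ofList (q.map (fun e => e.1.1)) ++ [w] := by
        rw [PySem.Set.ofList_eq_foldl, List.foldl_append, ← PySem.Set.ofList_eq_foldl]
        simp [PySem.Set.add, PySem.Set.contains, hwS]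
      rw [hset, List.map_append]
      congr 1
      · apply List.map_congr_left
        intro w' hw'
        have hne : w' ≠ w := by
          rintro rfl
          exact hwS hw'
        rw [pvWRow_append_ne q w w' l c hne]
      · have heq : PySem.Dict.mk (pvWRow (q ++ [((w, l), c)]) w)
            = (PySem.Dict.mk (pvWRow q w)).modify l 0 (· + c) :=
          pvWRow_append_same q w l c hl
        rw [pvWRow_of_not_mem q w hw] at heq
        simp only [List.map_cons, List.map_nil]
        rw [heq]
        rfl

lemma pvSet_words (ps : List (String × Int)) :
    PySem.Set.ofList ((PySem.Set.ofList ps).map Prod.fst)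
      = PySem.Set.ofList (ps.map Prod.fst) := by
  induction ps using List.reverseRecOn with
  | nil => rfl
  | append_singleton ps p ih =>
    have hof : ∀ (α : Type) (_ : BEq α) (l : List α) (x : α),
        PySem.Set.ofList (l ++ [x]) = PySem.Set.add (PySem.Set.ofList l) x := by
      intro α _ l x
      rw [PySem.Set.ofList_eq_foldl, List.foldl_append, ← PySem.Set.ofList_eq_foldl]
      rfl
    have e1 : (ps ++ [p]).map Prod.fst = ps.map Prod.fst ++ [p.1] := by simp
    rw [e1, hof _ _ ps p, hof _ _ (ps.map Prod.fst) p.1]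
    by_cases hp : p ∈ PySem.Set.ofList ps
    · have h1 : PySem.Set.add (PySem.Set.ofList ps) p = PySem.Set.ofList ps := by
        simp [PySem.Set.add, PySem.Set.contains, hp]
      have hm : p.1 ∈ PySem.Set.ofList (ps.map Prod.fst) := by
        rw [PySem.Set.mem_ofList]
        exact List.mem_map.2 ⟨p, (PySem.Set.mem_ofList ps p).1 hp, rfl⟩
      have h2 : PySem.Set.add (PySem.Set.ofList (ps.map Prod.fst)) p.1
          = PySem.Set.ofList (ps.map Prod.fst) := by
        simp [PySem.Set.add, PySem.Set.contains, hm]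
      rw [h1, h2, ih]
    · have h1 : PySem.Set.add (PySem.Set.ofList ps) p = PySem.Set.ofList ps ++ [p] := by
        simp [PySem.Set.add, PySem.Set.contains, hp]
      rw [h1, List.map_append, List.map_cons, List.map_nil, hof, ih]

lemma pvWGet_counter (ps : List (String × Int)) (w : String) (l : Int) :
    pvWGet ((PySem.Set.ofList ps).map (fun k => (k, (ps.count k : Int)))) w l
      = (ps.count ((w, l) : String × Int) : Int) := by
  rw [pvWGet, List.filter_map]
  have hpred : ((fun e => e.1 == ((w, l) : String × Int)) ∘ fun k => (k, (ps.count k : Int)))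
      = fun k => k == ((w, l) : String × Int) := rfl
  rw [hpred, List.filter_beq]
  by_cases hm : ((w, l) : String × Int) ∈ ps
  · have : (PySem.Set.ofList ps).count ((w, l) : String × Int) = 1 :=
      List.count_eq_one_of_mem (PySem.Set.nodup_ofList ps) ((PySem.Set.mem_ofList ps _).2 hm)
    rw [this]
    simp
  · have h0 : (PySem.Set.ofList ps).count ((w, l) : String × Int) = 0 := by
      rw [List.count_eq_zero, PySem.Set.mem_ofList]
      exact hm
    have h0' : ps.count ((w, l) : String × Int) = 0 := List.count_eq_zero.2 hm
    rw [h0, h0']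
    simp

lemma counts_eq (words : List String) (levels : List Int)
    (h : ∀ p ∈ words.zip levels, p.2 = 3 ∨ p.2 = 4 ∨ p.2 = 5) :
    (((words.zip levels).foldl (fun d p => d.insert p (d.getD p 0 + 1))
        PySem.Dict.empty).items.foldl pvStepB PySem.Dict.empty).items
      = (((words.zip levels).foldl pvStepA PySem.Dict.empty)).items := by
  set ps := words.zip levels with hps
  rw [PySem.Dict.foldl_insert_getD_add_one_eq_counter, foldA_items ps h]
  set q := (PySem.Dict.counter ps).items with hq
  have hqv : q = (PySem.Set.ofList ps).map (fun k => (k, (ps.count k : Int))) :=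
    PySem.Dict.items_counter ps
  have hql : ∀ e ∈ q, e.1.2 = 3 ∨ e.1.2 = 4 ∨ e.1.2 = 5 := by
    intro e he
    rw [hqv] at he
    obtain ⟨k, hk, rfl⟩ := List.mem_map.1 he
    exact h k ((PySem.Set.mem_ofList ps k).1 hk)
  rw [foldB_items q hql]
  rw [pvWTab, pvTab]
  have hwords : q.map (fun e => e.1.1) = (PySem.Set.ofList ps).map Prod.fst := by
    rw [hqv, List.map_map]
    rfl
  rw [hwords, pvSet_words]
  apply List.map_congr_left
  intro w hw
  have hrow : pvWRow q w = pvRow ps w := by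
    rw [pvWRow, pvRow, hqv]
    rw [pvWGet_counter, pvWGet_counter, pvWGet_counter]
  rw [hrow]


-- ===== VERDICT (by name: the statement is the Claim_ definition above) =====
theorem get_mle_counts_aligned_spec : Claim_equal_get_mle_counts_aligned := by
  unfold Claim_equal_get_mle_counts_aligned
  intro words levels _ hpre
  unfold Spec_get_mle_counts_aligned Pre_get_mle_counts_aligned at *
  simp only [get_mle_counts_aligned, get_mle_counts_aligned_alt]
  rw [counts_eq words levels hpre]
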